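-- pv_equiv track=rewrite | github.com/S-Christensen/cartographersStudy | scoringCards.py | caravansary
-- ===== SOURCE A (Python) =====
-- def dfs(grid, row, col, visited, terrain_type):
--     stack = [(row, col)]
--     cluster = []
--
--     while stack:
--         r, c = stack.pop()
--         if (r, c) not in visited and grid[r][c] == terrain_type:
--             visited.add((r, c))
--             cluster.append((r, c))
--             for dr, dc in [(1, 0), (-1, 0), (0, 1), (0, -1)]:
--                 nr, nc = r + dr, c + dc
--                 if 0 <= nr < len(grid) and 0 <= nc < len(grid[0]):
--                     stack.append((nr, nc))
--     return cluster
--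
-- def calculate_points(cluster):
--     rows = set()
--     cols = set()
--     for r, c in cluster:
--         rows.add(r)
--         cols.add(c)
--     return len(rows) + len(cols)
--
-- def caravansary(grid):
--     visited = set()
--     clusters = []
--
--     for row in range(len(grid)):
--         for col in range(len(grid[0])):
--             if (row, col) not in visited and grid[row][col] == "village":
--                 cluster = dfs(grid, row, col, visited, "village")
--                 clusters.append(cluster)
--
--     max_points = 0
--
--     for cluster in clusters:
--         points = calculate_points(cluster)
--         if points > max_points:
--             max_points = points
--
--     return max_points
-- ===== SOURCE B (Python) =====
-- def caravansary(grid):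
--     # Fixed-point label propagation instead of DFS flood fill: every village
--     # cell starts labelled by itself; sweeps repeatedly lower each cell's label
--     # to the minimum label among itself and its village neighbours until no
--     # label changes; cells with equal labels form a connected component.
--     cells = [(r, c) for r in range(len(grid)) for c in range(len(grid[0])) if grid[r][c] == "village"]
--     cellset = set(cells)
--     label = {p: p for p in cells}
--     changed = True
--     while changed:
--         changed = False
--         for p in cells:
--             r, c = p
--             m = label[p]
--             for q in ((r - 1, c), (r + 1, c), (r, c - 1), (r, c + 1)):
--                 if q in cellset and label[q] < m:
--                     m = label[q]
--             if m < label[p]: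
--                 label[p] = m
--                 changed = True
--     groups = {}
--     for p in cells:
--         rows, cols = groups.setdefault(label[p], (set(), set()))
--         rows.add(p[0])
--         cols.add(p[1])
--     best = 0
--     for rows, cols in groups.values():
--         if len(rows) + len(cols) > best:
--             best = len(rows) + len(cols)
--     return best
-- ===== Notes on version B (the rewrite author's own statement) =====
-- stated objective: alternative
-- what changed: Replaced the DFS flood fill (explicit stack, visited set, per-seed cluster lists) by fixed-point label propagation: every village cell starts labelled by itself, sweeps repeatedly lower each cell's label to the minimum label among itself and its village neighbours until no label changes, and cells with equal labels form a connected component whose distinct rows plus distinct columns are scored.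
import Mathlib
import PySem

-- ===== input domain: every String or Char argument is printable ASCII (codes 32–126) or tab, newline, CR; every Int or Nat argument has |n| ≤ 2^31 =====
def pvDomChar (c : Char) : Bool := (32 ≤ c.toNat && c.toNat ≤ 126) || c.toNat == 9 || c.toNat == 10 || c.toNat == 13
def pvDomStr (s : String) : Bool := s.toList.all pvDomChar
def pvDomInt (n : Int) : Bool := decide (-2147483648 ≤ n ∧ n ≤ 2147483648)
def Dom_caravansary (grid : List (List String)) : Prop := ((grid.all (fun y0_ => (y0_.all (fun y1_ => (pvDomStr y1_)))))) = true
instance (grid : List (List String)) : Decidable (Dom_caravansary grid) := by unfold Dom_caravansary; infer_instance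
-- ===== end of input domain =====

-- B replaces A's DFS flood fill by fixed-point label propagation over the village
-- cells (an alternative algorithm of similar cost; proved to return the same value).

-- grid[p.1][p.2] (both Python versions index exactly like this; none = IndexError)
def pvCell (grid : List (List String)) (p : Int × Int) : Option String :=
  (PySem.List.pyGet? grid p.1).bind fun row => PySem.List.pyGet? row p.2

-- ===== PORT A =====

-- the four (dr, dc) offsets, in A's order
def pvNbrOff : List (Int × Int) := [(1, 0), (-1, 0), (0, 1), (0, -1)]

-- the in-bounds neighbours pushed by A's inner `for dr, dc in …` loop
-- (stack top is the HEAD here; Python pushes at the end and pops from the end,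
-- so the last-appended neighbour must come first)
def pvPushes (grid : List (List String)) (p : Int × Int) : List (Int × Int) :=
  pvNbrOff.foldl (fun acc d =>
    if 0 ≤ p.1 + d.1 ∧ p.1 + d.1 < PySem.List.len grid ∧
       0 ≤ p.2 + d.2 ∧ p.2 + d.2 < PySem.List.len (PySem.List.pyGetD grid 0 []) then
      (p.1 + d.1, p.2 + d.2) :: acc
    else acc) []

-- finite universe of indices that can ever be added to `visited` (termination only)
def pvU (grid : List (List String)) : List (Int × Int) :=
  (PySem.List.pyRange (-(PySem.List.len grid)) (PySem.List.len grid) 1).flatMap fun r =>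
    match PySem.List.pyGet? grid r with
    | none => []
    | some row => (PySem.List.pyRange (-(PySem.List.len row)) (PySem.List.len row) 1).map fun c => (r, c)

lemma pvPushes_len_le (grid : List (List String)) (p : Int × Int) :
    (pvPushes grid p).length ≤ 4 := by
  have h : ∀ (l : List (Int × Int)) (acc : List (Int × Int)),
      (l.foldl (fun acc d =>
        if 0 ≤ p.1 + d.1 ∧ p.1 + d.1 < PySem.List.len grid ∧
           0 ≤ p.2 + d.2 ∧ p.2 + d.2 < PySem.List.len (PySem.List.pyGetD grid 0 []) then
          (p.1 + d.1, p.2 + d.2) :: acc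
        else acc) acc).length ≤ acc.length + l.length := by
    intro l
    induction l with
    | nil => intro acc; simp
    | cons d t ih =>
      intro acc
      rw [List.foldl_cons]
      by_cases hc : 0 ≤ p.1 + d.1 ∧ p.1 + d.1 < PySem.List.len grid ∧
           0 ≤ p.2 + d.2 ∧ p.2 + d.2 < PySem.List.len (PySem.List.pyGetD grid 0 [])
      · rw [if_pos hc]
        refine le_trans (ih _) ?_
        simp only [List.length_cons]
        omega
      · rw [if_neg hc]
        refine le_trans (ih _) ?_
        simp only [List.length_cons]
        omega
  exact le_trans (h pvNbrOff []) (by decide)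

lemma pv_mem_pvU {grid : List (List String)} {p : Int × Int} {s : String}
    (h : pvCell grid p = some s) : p ∈ pvU grid := by
  unfold pvCell at h
  cases hr : PySem.List.pyGet? grid p.1 with
  | none => rw [hr] at h; simp at h
  | some row =>
    rw [hr] at h; simp only [Option.bind_some] at h
    have hrin : PySem.Raise.InRange grid.length p.1 := by
      by_contra hc
      rw [(PySem.List.pyGet?_eq_none_iff (xs := grid) (i := p.1)).2 hc] at hr
      simp at hr
    have hcin : PySem.Raise.InRange row.length p.2 := by
      by_contra hc
      rw [(PySem.List.pyGet?_eq_none_iff (xs := row) (i := p.2)).2 hc] at h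
      simp at h
    unfold pvU
    rw [List.mem_flatMap]
    refine ⟨p.1, ?_, ?_⟩
    · rw [PySem.List.mem_pyRange_one]
      unfold PySem.Raise.InRange at hrin
      simp only [PySem.List.len_eq]
      omega
    · rw [hr]
      rw [List.mem_map]
      refine ⟨p.2, ?_, rfl⟩
      rw [PySem.List.mem_pyRange_one]
      unfold PySem.Raise.InRange at hcin
      simp only [PySem.List.len_eq]
      omega

lemma pvFilter_mono (visited : PySem.Set (Int × Int)) (p : Int × Int)
    (l : List (Int × Int)) :
    (l.filter fun x => !(PySem.Set.add visited p).contains x).length ≤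
      (l.filter fun x => !PySem.Set.contains visited x).length := by
  induction l with
  | nil => simp
  | cons a t ih =>
    rw [List.filter_cons, List.filter_cons]
    by_cases hv : PySem.Set.contains visited a = true
    · have hv2 : (PySem.Set.add visited p).contains a = true := by
        rw [PySem.Set.contains_iff] at hv ⊢
        rw [PySem.Set.mem_add]; exact Or.inl hv
      rw [if_neg (by rw [hv2]; simp), if_neg (by rw [hv]; simp)]
      exact ih
    · rw [Bool.not_eq_true] at hv
      by_cases hv2 : (PySem.Set.add visited p).contains a = true
      · rw [if_neg (by rw [hv2]; simp), if_pos (by rw [hv]; rfl)]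
        rw [List.length_cons]
        omega
      · rw [Bool.not_eq_true] at hv2
        rw [if_pos (by rw [hv2]; rfl), if_pos (by rw [hv]; rfl)]
        rw [List.length_cons, List.length_cons]
        omega

lemma pvFilter_lt (U : List (Int × Int)) (visited : PySem.Set (Int × Int)) (p : Int × Int)
    (hmem : p ∈ U) (hnc : p ∉ visited) :
    (U.filter fun x => !(PySem.Set.add visited p).contains x).length <
      (U.filter fun x => !PySem.Set.contains visited x).length := by
  obtain ⟨l1, l2, rfl⟩ := List.append_of_mem hmem
  have h1 := pvFilter_mono visited p l1
  have h2 := pvFilter_mono visited p l2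
  have hcp : (PySem.Set.add visited p).contains p = true := by
    rw [PySem.Set.contains_iff, PySem.Set.mem_add]; exact Or.inr rfl
  have hcv : PySem.Set.contains visited p = false := by
    rw [Bool.eq_false_iff]
    intro hc
    exact hnc ((PySem.Set.contains_iff _ _).1 hc)
  rw [List.filter_append, List.filter_append, List.filter_cons, List.filter_cons,
    if_neg (by rw [hcp]; simp), if_pos (by rw [hcv]; rfl)]
  rw [List.length_append, List.length_append, List.length_cons]
  omega

-- A's dfs: state is (visited, stack, cluster); returns (cluster, visited)
def dfsGo (grid : List (List String)) (terrain : String)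
    (visited : PySem.Set (Int × Int)) (stack : List (Int × Int))
    (cluster : List (Int × Int)) : List (Int × Int) × PySem.Set (Int × Int) :=
  match stack with
  | [] => (cluster, visited)
  | p :: rest =>
    if ¬ p ∈ visited ∧ pvCell grid p = some terrain then
      dfsGo grid terrain (PySem.Set.add visited p) (pvPushes grid p ++ rest) (cluster ++ [p])
    else
      dfsGo grid terrain visited rest cluster
termination_by 5 * ((pvU grid).filter fun x => !PySem.Set.contains visited x).length + stack.length
decreasing_by
  · rename_i h
    obtain ⟨hnv, hcell⟩ := h
    have h1 := pvFilter_lt (pvU grid) visited p (pv_mem_pvU hcell) hnv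
    have h2 := pvPushes_len_le grid p
    simp only [List.length_append, List.length_cons]
    omega
  · simp only [List.length_cons]; omega

def calcPoints (cluster : List (Int × Int)) : Int :=
  let rc := cluster.foldl
    (fun (s : PySem.Set Int × PySem.Set Int) p => (PySem.Set.add s.1 p.1, PySem.Set.add s.2 p.2))
    ([], [])
  PySem.List.len rc.1 + PySem.List.len rc.2

def caravansary (grid : List (List String)) : Int :=
  let vc := (PySem.List.pyRange 0 (PySem.List.len grid) 1).foldl (fun st r =>
      (PySem.List.pyRange 0 (PySem.List.len (PySem.List.pyGetD grid 0 [])) 1).foldl (fun st c =>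
        if ¬ (r, c) ∈ st.1 ∧ pvCell grid (r, c) = some "village" then
          let res := dfsGo grid "village" st.1 [(r, c)] []
          (res.2, st.2 ++ [res.1])
        else st) st)
    (([] : PySem.Set (Int × Int)), ([] : List (List (Int × Int))))
  vc.2.foldl (fun mx cl =>
    let pts := calcPoints cl
    if pts > mx then pts else mx) 0

-- ===== PORT B =====

-- neighbours in B's order   ((r-1,c), (r+1,c), (r,c-1), (r,c+1))
def pvNbrs (p : Int × Int) : List (Int × Int) :=
  [(p.1 - 1, p.2), (p.1 + 1, p.2), (p.1, p.2 - 1), (p.1, p.2 + 1)]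

-- Python's `<` on int pairs (lexicographic)
def pairLt (a b : Int × Int) : Bool := a.1 < b.1 || (a.1 == b.1 && a.2 < b.2)

-- the comprehension: row-major list of village cells
def cellsB (grid : List (List String)) : List (Int × Int) :=
  (PySem.List.pyRange 0 (PySem.List.len grid) 1).flatMap fun r =>
    ((PySem.List.pyRange 0 (PySem.List.len (PySem.List.pyGetD grid 0 [])) 1).filter
      (fun c => pvCell grid (r, c) == some "village")).map fun c => (r, c)

-- one `for p in cells` sweep of the label map; the Bool is `changed`
def sweepB (cells : List (Int × Int)) (cellset : PySem.Set (Int × Int))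
    (lab : PySem.Dict (Int × Int) (Int × Int)) :
    PySem.Dict (Int × Int) (Int × Int) × Bool :=
  cells.foldl (fun st p =>
    let m0 := st.1.getD p p
    let m := (pvNbrs p).foldl (fun m q =>
      if PySem.Set.contains cellset q ∧ pairLt (st.1.getD q q) m then st.1.getD q q else m) m0
    if pairLt m m0 then (st.1.insert p m, true) else st) (lab, false)

-- `while changed:` — the fuel passed in caravansary_alt provably exceeds the
-- number of label-changing sweeps, so the 0 case is never reached
def loopB (cells : List (Int × Int)) (cellset : PySem.Set (Int × Int)) :
    Nat → PySem.Dict (Int × Int) (Int × Int) → PySem.Dict (Int × Int) (Int × Int)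
  | 0, lab => lab
  | fuel + 1, lab =>
    let s := sweepB cells cellset lab
    if s.2 then loopB cells cellset fuel s.1 else s.1

def caravansary_alt (grid : List (List String)) : Int :=
  let cells := cellsB grid
  let cellset := PySem.Set.ofList cells
  let lab0 := cells.foldl (fun d p => d.insert p p) PySem.Dict.empty
  let lab := loopB cells cellset
    (cells.length * (grid.length * (PySem.List.pyGetD grid 0 []).length) + 1) lab0
  let groups := cells.foldl (fun g p =>
      g.modify (lab.getD p p) (([], []) : PySem.Set Int × PySem.Set Int)
        (fun cur => (PySem.Set.add cur.1 p.1, PySem.Set.add cur.2 p.2)))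
    PySem.Dict.empty
  (PySem.Dict.values groups).foldl (fun best g =>
    if PySem.List.len g.1 + PySem.List.len g.2 > best then PySem.List.len g.1 + PySem.List.len g.2
    else best) 0

-- ===== PRECONDITION & SPEC =====

-- Pre_ excludes exactly the ragged grids in which some row is shorter than row 0:
-- there both A and B raise IndexError.
def Pre_caravansary (grid : List (List String)) : Prop :=
  ∀ row ∈ grid, (PySem.List.pyGetD grid 0 []).length ≤ row.length

instance (grid : List (List String)) : Decidable (Pre_caravansary grid) := by
  unfold Pre_caravansary; infer_instance

def pvWitness_caravansary : List (List String) :=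
  [["village", "x"], ["x", "village"]]

def Spec_caravansary (grid : List (List String)) (out : Int) : Prop := out = caravansary_alt grid
instance (grid : List (List String)) (out : Int) : Decidable (Spec_caravansary grid out) := by
  unfold Spec_caravansary; infer_instance

-- ===== CLAIM (what is proved, stated in full; the proofs are below) =====
def Claim_equal_caravansary : Prop :=
  ∀ (grid : List (List String)), Dom_caravansary grid → Pre_caravansary grid →
    Spec_caravansary grid (caravansary grid)

-- ===== LEMMAS AND PROOFS =====


-- ---------- basic geometry ----------

def pvW (grid : List (List String)) : Nat := (PySem.List.pyGetD grid 0 []).length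

def pvBounds (grid : List (List String)) (p : Int × Int) : Prop :=
  0 ≤ p.1 ∧ p.1 < grid.length ∧ 0 ≤ p.2 ∧ p.2 < pvW grid

def rowMajor (grid : List (List String)) : List (Int × Int) :=
  (PySem.List.pyRange 0 (PySem.List.len grid) 1).flatMap fun r =>
    (PySem.List.pyRange 0 (PySem.List.len (PySem.List.pyGetD grid 0 [])) 1).map fun c => (r, c)

lemma mem_rowMajor {grid : List (List String)} {p : Int × Int} :
    p ∈ rowMajor grid ↔ pvBounds grid p := by
  unfold rowMajor
  rw [List.mem_flatMap]
  constructor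
  · rintro ⟨r, hr, hm⟩
    rw [List.mem_map] at hm
    obtain ⟨c, hc, rfl⟩ := hm
    rw [PySem.List.mem_pyRange_one] at hr hc
    simp only [PySem.List.len_eq] at hr hc
    exact ⟨hr.1, hr.2, hc.1, hc.2⟩
  · rintro ⟨h1, h2, h3, h4⟩
    refine ⟨p.1, ?_, ?_⟩
    · rw [PySem.List.mem_pyRange_one]
      simp only [PySem.List.len_eq]
      exact ⟨h1, h2⟩
    · rw [List.mem_map]
      refine ⟨p.2, ?_, rfl⟩
      rw [PySem.List.mem_pyRange_one]
      simp only [PySem.List.len_eq]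
      exact ⟨h3, h4⟩

lemma mem_cellsB {grid : List (List String)} {p : Int × Int} :
    p ∈ cellsB grid ↔ pvBounds grid p ∧ pvCell grid p = some "village" := by
  unfold cellsB
  rw [List.mem_flatMap]
  constructor
  · rintro ⟨r, hr, hm⟩
    rw [List.mem_map] at hm
    obtain ⟨c, hc, rfl⟩ := hm
    rw [List.mem_filter] at hc
    rw [PySem.List.mem_pyRange_one] at hr
    obtain ⟨hc1, hc2⟩ := hc
    rw [PySem.List.mem_pyRange_one] at hc1
    simp only [PySem.List.len_eq] at hr hc1
    rw [beq_iff_eq] at hc2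
    exact ⟨⟨hr.1, hr.2, hc1.1, hc1.2⟩, hc2⟩
  · rintro ⟨⟨h1, h2, h3, h4⟩, hv⟩
    refine ⟨p.1, ?_, ?_⟩
    · rw [PySem.List.mem_pyRange_one]
      simp only [PySem.List.len_eq]
      exact ⟨h1, h2⟩
    · rw [List.mem_map]
      refine ⟨p.2, ?_, rfl⟩
      rw [List.mem_filter]
      constructor
      · rw [PySem.List.mem_pyRange_one]
        simp only [PySem.List.len_eq]
        exact ⟨h3, h4⟩
      · rw [beq_iff_eq]
        exact hv

def Adjp (p q : Int × Int) : Prop :=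
  (p.1 = q.1 ∧ (p.2 = q.2 + 1 ∨ q.2 = p.2 + 1)) ∨ (p.2 = q.2 ∧ (p.1 = q.1 + 1 ∨ q.1 = p.1 + 1))

lemma Adjp_symm {p q : Int × Int} (h : Adjp p q) : Adjp q p := by
  unfold Adjp at h ⊢; omega

lemma mem_pvNbrs {p q : Int × Int} : q ∈ pvNbrs p ↔ Adjp p q := by
  unfold pvNbrs Adjp
  simp only [List.mem_cons, List.not_mem_nil, or_false, Prod.ext_iff]
  omega

lemma mem_pvPushes {grid : List (List String)} {p q : Int × Int} :
    q ∈ pvPushes grid p ↔ Adjp p q ∧ pvBounds grid q := by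
  have key : ∀ (l : List (Int × Int)) (acc : List (Int × Int)),
      q ∈ l.foldl (fun acc d =>
        if 0 ≤ p.1 + d.1 ∧ p.1 + d.1 < PySem.List.len grid ∧
           0 ≤ p.2 + d.2 ∧ p.2 + d.2 < PySem.List.len (PySem.List.pyGetD grid 0 []) then
          (p.1 + d.1, p.2 + d.2) :: acc
        else acc) acc ↔
      q ∈ acc ∨ ∃ d ∈ l, (0 ≤ p.1 + d.1 ∧ p.1 + d.1 < PySem.List.len grid ∧
           0 ≤ p.2 + d.2 ∧ p.2 + d.2 < PySem.List.len (PySem.List.pyGetD grid 0 [])) ∧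
           q = (p.1 + d.1, p.2 + d.2) := by
    intro l
    induction l with
    | nil => intro acc; simp
    | cons d t ih =>
      intro acc
      rw [List.foldl_cons]
      by_cases hc : 0 ≤ p.1 + d.1 ∧ p.1 + d.1 < PySem.List.len grid ∧
           0 ≤ p.2 + d.2 ∧ p.2 + d.2 < PySem.List.len (PySem.List.pyGetD grid 0 [])
      · rw [if_pos hc, ih]
        simp only [List.mem_cons]
        constructor
        · rintro ((rfl | hq) | ⟨d', hd', hcd', rfl⟩)
          · exact Or.inr ⟨d, Or.inl rfl, hc, rfl⟩
          · exact Or.inl hq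
          · exact Or.inr ⟨d', Or.inr hd', hcd', rfl⟩
        · rintro (hq | ⟨d', (rfl | hd'), hcd', rfl⟩)
          · exact Or.inl (Or.inr hq)
          · exact Or.inl (Or.inl rfl)
          · exact Or.inr ⟨d', hd', hcd', rfl⟩
      · rw [if_neg hc, ih]
        simp only [List.mem_cons]
        constructor
        · rintro (hq | ⟨d', hd', hcd', rfl⟩)
          · exact Or.inl hq
          · exact Or.inr ⟨d', Or.inr hd', hcd', rfl⟩
        · rintro (hq | ⟨d', (rfl | hd'), hcd', rfl⟩)
          · exact Or.inl hq
          · exact absurd hcd' hc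
          · exact Or.inr ⟨d', hd', hcd', rfl⟩
  unfold pvPushes
  rw [key]
  simp only [List.not_mem_nil, false_or, pvNbrOff, List.mem_cons, List.not_mem_nil, or_false,
    PySem.List.len_eq]
  unfold Adjp pvBounds pvW
  constructor
  · rintro ⟨d, (rfl | rfl | rfl | rfl), hcd, rfl⟩ <;> simp at hcd ⊢ <;> omega
  · rintro ⟨hadj, hb⟩
    rcases hadj with ⟨h1, h2 | h2⟩ | ⟨h1, h2 | h2⟩
    · refine ⟨(0, -1), by simp, by simp; omega, by rw [Prod.ext_iff]; simp; omega⟩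
    · refine ⟨(0, 1), by simp, by simp; omega, by rw [Prod.ext_iff]; simp; omega⟩
    · refine ⟨(-1, 0), by simp, by simp; omega, by rw [Prod.ext_iff]; simp; omega⟩
    · refine ⟨(1, 0), by simp, by simp; omega, by rw [Prod.ext_iff]; simp; omega⟩

-- ---------- the connectivity relation ----------

def Stepg (grid : List (List String)) (p q : Int × Int) : Prop :=
  p ∈ cellsB grid ∧ q ∈ cellsB grid ∧ Adjp p q

def Conng (grid : List (List String)) : Int × Int → Int × Int → Prop :=
  Relation.ReflTransGen (Stepg grid)

lemma Stepg_symm {grid : List (List String)} {p q : Int × Int} (h : Stepg grid p q) :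
    Stepg grid q p := ⟨h.2.1, h.1, Adjp_symm h.2.2⟩

lemma Conng_symm {grid : List (List String)} {p q : Int × Int} (h : Conng grid p q) :
    Conng grid q p := by
  induction h with
  | refl => exact Relation.ReflTransGen.refl
  | tail _ h2 ih =>
    exact Relation.ReflTransGen.trans (Relation.ReflTransGen.single (Stepg_symm h2)) ih

def Closedg (grid : List (List String)) (v : List (Int × Int)) : Prop :=
  ∀ p ∈ v, ∀ q, Stepg grid p q → q ∈ v

lemma Closedg_conn {grid : List (List String)} {v : List (Int × Int)} {p q : Int × Int}
    (hcl : Closedg grid v) (hp : p ∈ v) (hc : Conng grid p q) : q ∈ v := by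
  induction hc with
  | refl => exact hp
  | tail _ h2 ih => exact hcl _ ih _ h2

lemma not_mem_closed {grid : List (List String)} {v : List (Int × Int)} {seed q : Int × Int}
    (hcl : Closedg grid v) (hs : seed ∉ v) (hq : Conng grid seed q) : q ∉ v :=
  fun hqv => hs (Closedg_conn hcl hqv (Conng_symm hq))

-- ---------- the DFS (A) computes connected components ----------

lemma dfs_escape {grid : List (List String)} {cluster stack : List (Int × Int)}
    (h3 : ∀ x ∈ cluster, ∀ q, Stepg grid x q → q ∈ cluster ∨ q ∈ stack)
    {x q : Int × Int} (hx : x ∈ cluster) (hc : Conng grid x q) :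
    q ∈ cluster ∨ ∃ s ∈ stack, s ∈ cellsB grid ∧ Conng grid s q := by
  induction hc with
  | refl => exact Or.inl hx
  | tail _ h2 ih =>
    rcases ih with hb | ⟨s, hs, hsc, hconn⟩
    · rcases h3 _ hb _ h2 with h | h
      · exact Or.inl h
      · exact Or.inr ⟨_, h, h2.2.1, Relation.ReflTransGen.refl⟩
    · exact Or.inr ⟨s, hs, hsc, hconn.tail h2⟩

lemma dfsGo_inv (grid : List (List String)) (seed : Int × Int) (visited0 : PySem.Set (Int × Int))
    (hcl0 : Closedg grid visited0) (hds : seed ∉ visited0) (hseed : seed ∈ cellsB grid) :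
    ∀ (visited : PySem.Set (Int × Int)) (stack cluster : List (Int × Int)),
    (∀ x, x ∈ visited ↔ x ∈ visited0 ∨ x ∈ cluster) →
    (∀ s ∈ stack, pvBounds grid s) →
    (∀ x ∈ cluster, x ∈ cellsB grid ∧ Conng grid seed x) →
    (∀ x ∈ cluster, ∀ q, Stepg grid x q → q ∈ cluster ∨ q ∈ stack) →
    (∀ q, q ∈ cellsB grid → Conng grid seed q →
      q ∈ cluster ∨ ∃ s ∈ stack, s ∈ cellsB grid ∧ Conng grid s q) →
    (∀ s ∈ stack, s ∈ cellsB grid → Conng grid seed s) →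
    (∀ x, x ∈ (dfsGo grid "village" visited stack cluster).1 ↔
        x ∈ cellsB grid ∧ Conng grid seed x) ∧
    (∀ x, x ∈ (dfsGo grid "village" visited stack cluster).2 ↔
        x ∈ visited0 ∨ x ∈ (dfsGo grid "village" visited stack cluster).1) := by
  intro visited stack cluster
  induction visited, stack, cluster using dfsGo.induct grid "village" with
  | case1 visited cluster =>
    intro h1 _ h2 _ h4 _
    simp only [dfsGo]
    constructor
    · intro x
      constructor
      · exact fun hx => h2 x hx
      · rintro ⟨hxc, hconn⟩
        rcases h4 x hxc hconn with h | ⟨s, hs, -, -⟩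
        · exact h
        · simp at hs
    · exact h1
  | case2 visited cluster p rest hcond ih =>
    intro h1 hb h2 h3 h4 h5
    simp only [dfsGo]
    rw [if_pos hcond]
    have hpb : pvBounds grid p := hb p List.mem_cons_self
    have hpcell : p ∈ cellsB grid := mem_cellsB.2 ⟨hpb, hcond.2⟩
    have hpc : Conng grid seed p := h5 p List.mem_cons_self hpcell
    have h3n : ∀ x ∈ cluster ++ [p], ∀ q, Stepg grid x q →
        q ∈ cluster ++ [p] ∨ q ∈ pvPushes grid p ++ rest := by
      intro x hx q hstep
      rcases List.mem_append.1 hx with hx | hx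
      · rcases h3 x hx q hstep with h | h
        · exact Or.inl (List.mem_append.2 (Or.inl h))
        · rcases List.mem_cons.1 h with rfl | h
          · exact Or.inl (List.mem_append.2 (Or.inr (List.mem_singleton.2 rfl)))
          · exact Or.inr (List.mem_append.2 (Or.inr h))
      · rw [List.mem_singleton] at hx
        subst hx
        right
        refine List.mem_append.2 (Or.inl ?_)
        rw [mem_pvPushes]
        exact ⟨hstep.2.2, (mem_cellsB.1 hstep.2.1).1⟩
    apply ih
    · intro x
      rw [PySem.Set.mem_add, h1 x, List.mem_append, List.mem_singleton]
      tauto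
    · intro s hs
      rcases List.mem_append.1 hs with h | h
      · exact (mem_pvPushes.1 h).2
      · exact hb s (List.mem_cons_of_mem _ h)
    · intro x hx
      rcases List.mem_append.1 hx with h | h
      · exact h2 x h
      · rw [List.mem_singleton] at h
        subst h
        exact ⟨hpcell, hpc⟩
    · exact h3n
    · intro q hqc hconn
      rcases h4 q hqc hconn with h | ⟨s, hs, hscell, hsconn⟩
      · exact Or.inl (List.mem_append.2 (Or.inl h))
      · rcases List.mem_cons.1 hs with rfl | hs
        · exact dfs_escape h3n (List.mem_append.2 (Or.inr (List.mem_singleton.2 rfl))) hsconn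
        · exact Or.inr ⟨s, List.mem_append.2 (Or.inr hs), hscell, hsconn⟩
    · intro s hs hscell
      rcases List.mem_append.1 hs with h | h
      · have hadj : Adjp p s := (mem_pvPushes.1 h).1
        exact hpc.tail ⟨hpcell, hscell, hadj⟩
      · exact h5 s (List.mem_cons_of_mem _ h) hscell
  | case3 visited cluster p rest hcond ih =>
    intro h1 hb h2 h3 h4 h5
    simp only [dfsGo]
    rw [if_neg hcond]
    have hkey : p ∈ cellsB grid → p ∈ cluster := by
      intro hpcell
      have hvis : p ∈ visited := by
        by_contra hnv
        exact hcond ⟨hnv, (mem_cellsB.1 hpcell).2⟩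
      rcases (h1 p).1 hvis with h | h
      · exact absurd h (not_mem_closed hcl0 hds (h5 p List.mem_cons_self hpcell))
      · exact h
    have h3n : ∀ x ∈ cluster, ∀ q, Stepg grid x q → q ∈ cluster ∨ q ∈ rest := by
      intro x hx q hstep
      rcases h3 x hx q hstep with h | h
      · exact Or.inl h
      · rcases List.mem_cons.1 h with rfl | h
        · exact Or.inl (hkey hstep.2.1)
        · exact Or.inr h
    apply ih
    · exact h1
    · intro s hs
      exact hb s (List.mem_cons_of_mem _ hs)
    · exact h2
    · exact h3n
    · intro q hqc hconn
      rcases h4 q hqc hconn with h | ⟨s, hs, hscell, hsconn⟩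
      · exact Or.inl h
      · rcases List.mem_cons.1 hs with rfl | hs
        · exact dfs_escape h3n (hkey hscell) hsconn
        · exact Or.inr ⟨s, hs, hscell, hsconn⟩
    · intro s hs hscell
      exact h5 s (List.mem_cons_of_mem _ hs) hscell

lemma dfsGo_spec (grid : List (List String)) (seed : Int × Int)
    (visited0 : PySem.Set (Int × Int))
    (hcl0 : Closedg grid visited0) (hds : seed ∉ visited0) (hseed : seed ∈ cellsB grid) :
    (∀ x, x ∈ (dfsGo grid "village" visited0 [seed] []).1 ↔
        x ∈ cellsB grid ∧ Conng grid seed x) ∧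
    (∀ x, x ∈ (dfsGo grid "village" visited0 [seed] []).2 ↔
        x ∈ visited0 ∨ x ∈ (dfsGo grid "village" visited0 [seed] []).1) := by
  apply dfsGo_inv grid seed visited0 hcl0 hds hseed visited0 [seed] []
  · intro x
    simp
  · intro s hs
    rw [List.mem_singleton] at hs
    subst hs
    exact (mem_cellsB.1 hseed).1
  · intro x hx
    simp at hx
  · intro x hx
    simp at hx
  · intro q hqc hconn
    exact Or.inr ⟨seed, List.mem_singleton.2 rfl, hseed, hconn⟩
  · intro s hs _
    rw [List.mem_singleton] at hs
    subst hs
    exact Relation.ReflTransGen.refl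

-- ---------- points of a cluster depend only on its member set ----------

def ptsList (l : List (Int × Int)) : Int :=
  ((l.map Prod.fst).dedup.length : Int) + ((l.map Prod.snd).dedup.length : Int)

lemma ptsList_congr {l1 l2 : List (Int × Int)} (h : ∀ x, x ∈ l1 ↔ x ∈ l2) :
    ptsList l1 = ptsList l2 := by
  have key : ∀ (m1 m2 : List Int), (∀ x, x ∈ m1 ↔ x ∈ m2) →
      m1.dedup.length = m2.dedup.length := by
    intro m1 m2 hm
    have hperm : m1.dedup.Perm m2.dedup := by
      rw [List.perm_ext_iff_of_nodup m1.nodup_dedup m2.nodup_dedup]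
      intro x
      rw [List.mem_dedup, List.mem_dedup]
      exact hm x
    exact hperm.length_eq
  unfold ptsList
  have hf : ∀ x, x ∈ l1.map Prod.fst ↔ x ∈ l2.map Prod.fst := by
    intro x
    simp only [List.mem_map]
    constructor <;> rintro ⟨p, hp, rfl⟩
    · exact ⟨p, (h p).1 hp, rfl⟩
    · exact ⟨p, (h p).2 hp, rfl⟩
  have hs : ∀ x, x ∈ l1.map Prod.snd ↔ x ∈ l2.map Prod.snd := by
    intro x
    simp only [List.mem_map]
    constructor <;> rintro ⟨p, hp, rfl⟩
    · exact ⟨p, (h p).1 hp, rfl⟩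
    · exact ⟨p, (h p).2 hp, rfl⟩
  rw [key _ _ hf, key _ _ hs]

lemma pairSetFold (cl : List (Int × Int)) :
    cl.foldl (fun (s : PySem.Set Int × PySem.Set Int) p =>
        (PySem.Set.add s.1 p.1, PySem.Set.add s.2 p.2)) ([], []) =
      (PySem.Set.ofList (cl.map Prod.fst), PySem.Set.ofList (cl.map Prod.snd)) := by
  rw [PySem.List.foldl_prod_mk (f := fun a (p : Int × Int) => PySem.Set.add a p.1)
    (g := fun a (p : Int × Int) => PySem.Set.add a p.2)]
  rw [← PySem.Set.update_map_eq_foldl_add, ← PySem.Set.update_map_eq_foldl_add,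
    PySem.Set.update_nil_left, PySem.Set.update_nil_left]

lemma len_ofList_eq_dedup (l : List Int) :
    (PySem.Set.ofList l).length = l.dedup.length := by
  have hperm : (PySem.Set.ofList l).Perm l.dedup := by
    rw [List.perm_ext_iff_of_nodup (PySem.Set.nodup_ofList l) l.nodup_dedup]
    intro x
    rw [PySem.Set.mem_ofList, List.mem_dedup]
  exact hperm.length_eq

lemma calcPoints_eq (cl : List (Int × Int)) : calcPoints cl = ptsList cl := by
  simp only [calcPoints, pairSetFold, PySem.List.len_eq, ptsList, len_ofList_eq_dedup]

noncomputable def compL (grid : List (List String)) (p : Int × Int) : List (Int × Int) :=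
  (cellsB grid).filter (fun q => @decide (Conng grid p q) (Classical.propDecidable _))

lemma mem_compL {grid : List (List String)} {p q : Int × Int} :
    q ∈ compL grid p ↔ q ∈ cellsB grid ∧ Conng grid p q := by
  unfold compL
  rw [List.mem_filter]
  constructor
  · rintro ⟨h1, h2⟩
    exact ⟨h1, @of_decide_eq_true (Conng grid p q) (Classical.propDecidable _) h2⟩
  · rintro ⟨h1, h2⟩
    exact ⟨h1, @decide_eq_true (Conng grid p q) (Classical.propDecidable _) h2⟩

noncomputable def ptsC (grid : List (List String)) (p : Int × Int) : Int :=
  ptsList (compL grid p)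

lemma ptsC_congr {grid : List (List String)} {p q : Int × Int}
    (h : Conng grid p q) : ptsC grid p = ptsC grid q := by
  unfold ptsC
  apply ptsList_congr
  intro x
  rw [mem_compL, mem_compL]
  constructor
  · rintro ⟨hx, hc⟩
    exact ⟨hx, Relation.ReflTransGen.trans (Conng_symm h) hc⟩
  · rintro ⟨hx, hc⟩
    exact ⟨hx, Relation.ReflTransGen.trans h hc⟩

-- ---------- running maximum ----------

lemma best_unique (l1 l2 : List Int)
    (h12 : ∀ v ∈ l1, v ∈ l2) (h21 : ∀ v ∈ l2, v ∈ l1) :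
    l1.foldl max 0 = l2.foldl max 0 := by
  have key : ∀ (m1 m2 : List Int), (∀ v ∈ m1, v ∈ m2) →
      m1.foldl max 0 ≤ m2.foldl max 0 := by
    intro m1 m2 hsub
    have h2 := PySem.List.le_foldl_max m2 0
    rcases PySem.List.foldl_max_mem m1 0 with h | h
    · rw [h]; exact h2.1
    · exact h2.2 _ (hsub _ h)
  exact le_antisymm (key l1 l2 h12) (key l2 l1 h21)

lemma foldl_best_map {α : Type} (f : α → Int) (l : List α) (a : Int) :
    l.foldl (fun mx x => if f x > mx then f x else mx) a = (l.map f).foldl max a := by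
  induction l generalizing a with
  | nil => rfl
  | cons x t ih =>
    rw [List.foldl_cons, List.map_cons, List.foldl_cons, ih]
    congr 1
    by_cases h : a < f x
    · rw [if_pos h, max_eq_right h.le]
    · rw [if_neg h, max_eq_left (not_lt.1 h)]

-- ---------- A: outer loop ----------

@[reducible] def pvStepA (grid : List (List String))
    (st : PySem.Set (Int × Int) × List (List (Int × Int))) (x : Int × Int) :
    PySem.Set (Int × Int) × List (List (Int × Int)) :=
  if ¬ x ∈ st.1 ∧ pvCell grid x = some "village" then
    let res := dfsGo grid "village" st.1 [x] []
    (res.2, st.2 ++ [res.1])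
  else st

def OuterInv (grid : List (List String))
    (st : PySem.Set (Int × Int) × List (List (Int × Int))) : Prop :=
  (∀ x, x ∈ st.1 ↔ ∃ cl ∈ st.2, x ∈ cl) ∧
  Closedg grid st.1 ∧
  (∀ cl ∈ st.2, ∃ s ∈ cellsB grid, s ∈ cl ∧ (∀ x, x ∈ cl ↔ x ∈ cellsB grid ∧ Conng grid s x))

lemma outer_fold (grid : List (List String)) :
    ∀ (l : List (Int × Int)) (st : PySem.Set (Int × Int) × List (List (Int × Int))),
    (∀ x ∈ l, pvBounds grid x) → OuterInv grid st →
    OuterInv grid (l.foldl (pvStepA grid) st) ∧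
    (∀ x ∈ l, x ∈ cellsB grid → x ∈ (l.foldl (pvStepA grid) st).1) ∧
    (∀ x ∈ st.1, x ∈ (l.foldl (pvStepA grid) st).1) := by
  intro l
  induction l with
  | nil =>
    intro st _ hInv
    rw [List.foldl_nil]
    refine ⟨hInv, ?_, fun x hx => hx⟩
    intro x hx
    simp at hx
  | cons x t ih =>
    intro st hl hInv
    rw [List.foldl_cons]
    by_cases hc : ¬ x ∈ st.1 ∧ pvCell grid x = some "village"
    · have hstep : pvStepA grid st x = ((dfsGo grid "village" st.1 [x] []).2,
          st.2 ++ [(dfsGo grid "village" st.1 [x] []).1]) := by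
        unfold pvStepA
        rw [if_pos hc]
      have hxcell : x ∈ cellsB grid := mem_cellsB.2 ⟨hl x List.mem_cons_self, hc.2⟩
      obtain ⟨hio, hcl, hcls⟩ := hInv
      obtain ⟨hres1, hres2⟩ := dfsGo_spec grid x st.1 hcl hc.1 hxcell
      have hInv2 : OuterInv grid (pvStepA grid st x) := by
        rw [hstep]
        refine ⟨?_, ?_, ?_⟩
        · intro y
          constructor
          · intro hy
            rcases (hres2 y).1 hy with hy2 | hy2
            · obtain ⟨cl, hcl2, hycl⟩ := (hio y).1 hy2
              exact ⟨cl, List.mem_append.2 (Or.inl hcl2), hycl⟩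
            · exact ⟨_, List.mem_append.2 (Or.inr (List.mem_singleton.2 rfl)), hy2⟩
          · rintro ⟨cl, hcl2, hycl⟩
            rcases List.mem_append.1 hcl2 with h | h
            · exact (hres2 y).2 (Or.inl ((hio y).2 ⟨cl, h, hycl⟩))
            · rw [List.mem_singleton] at h
              subst h
              exact (hres2 y).2 (Or.inr hycl)
        · intro a ha q hstepq
          rcases (hres2 a).1 ha with ha2 | ha2
          · exact (hres2 q).2 (Or.inl (hcl a ha2 q hstepq))
          · refine (hres2 q).2 (Or.inr ?_)
            rw [hres1]
            exact ⟨hstepq.2.1, ((hres1 a).1 ha2).2.tail hstepq⟩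
        · intro cl hcl2
          rcases List.mem_append.1 hcl2 with h | h
          · exact hcls cl h
          · rw [List.mem_singleton] at h
            subst h
            refine ⟨x, hxcell, ?_, fun y => hres1 y⟩
            exact (hres1 x).2 ⟨hxcell, Relation.ReflTransGen.refl⟩
      obtain ⟨hfin, hcov, hmono⟩ := ih (pvStepA grid st x)
        (fun y hy => hl y (List.mem_cons_of_mem _ hy)) hInv2
      refine ⟨hfin, ?_, ?_⟩
      · intro y hy hycell
        rcases List.mem_cons.1 hy with rfl | hyt
        · apply hmono
          rw [hstep]
          exact (hres2 y).2 (Or.inr ((hres1 y).2 ⟨hycell, Relation.ReflTransGen.refl⟩))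
        · exact hcov y hyt hycell
      · intro y hy
        apply hmono
        rw [hstep]
        exact (hres2 y).2 (Or.inl hy)
    · have hstep : pvStepA grid st x = st := by
        unfold pvStepA
        rw [if_neg hc]
      rw [hstep]
      obtain ⟨hfin, hcov, hmono⟩ := ih st (fun y hy => hl y (List.mem_cons_of_mem _ hy)) hInv
      refine ⟨hfin, ?_, hmono⟩
      intro y hy hycell
      rcases List.mem_cons.1 hy with rfl | hyt
      · apply hmono
        by_contra hny
        exact hc ⟨hny, (mem_cellsB.1 hycell).2⟩
      · exact hcov y hyt hycell

lemma foldl_nested {σ : Type} (g : σ → Int × Int → σ) (rs cs : List Int) (init : σ) :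
    rs.foldl (fun st r => cs.foldl (fun st c => g st (r, c)) st) init =
      (rs.flatMap fun r => cs.map fun c => (r, c)).foldl g init := by
  induction rs generalizing init with
  | nil => simp
  | cons r t ih =>
    rw [List.foldl_cons, List.flatMap_cons, List.foldl_append, List.foldl_map, ih]

lemma caravansary_eq_fold (grid : List (List String)) :
    caravansary grid =
      (((rowMajor grid).foldl (pvStepA grid) ([], [])).2.map calcPoints).foldl max 0 := by
  have hvc : ((PySem.List.pyRange 0 (PySem.List.len grid) 1).foldl (fun st r =>
      (PySem.List.pyRange 0 (PySem.List.len (PySem.List.pyGetD grid 0 [])) 1).foldl (fun st c =>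
        if ¬ (r, c) ∈ st.1 ∧ pvCell grid (r, c) = some "village" then
          let res := dfsGo grid "village" st.1 [(r, c)] []
          (res.2, st.2 ++ [res.1])
        else st) st)
    (([] : PySem.Set (Int × Int)), ([] : List (List (Int × Int))))) =
      (rowMajor grid).foldl (pvStepA grid) ([], []) := by
    unfold rowMajor
    rw [foldl_nested (g := pvStepA grid)]
  show (((PySem.List.pyRange 0 (PySem.List.len grid) 1).foldl (fun st r =>
      (PySem.List.pyRange 0 (PySem.List.len (PySem.List.pyGetD grid 0 [])) 1).foldl (fun st c =>
        if ¬ (r, c) ∈ st.1 ∧ pvCell grid (r, c) = some "village" then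
          let res := dfsGo grid "village" st.1 [(r, c)] []
          (res.2, st.2 ++ [res.1])
        else st) st)
    (([] : PySem.Set (Int × Int)), ([] : List (List (Int × Int))))).2.foldl
      (fun mx cl => if calcPoints cl > mx then calcPoints cl else mx) 0) = _
  rw [hvc, foldl_best_map]

lemma valsA_spec (grid : List (List String)) :
    ∃ vals : List Int,
      caravansary grid = vals.foldl max 0 ∧
      (∀ v ∈ vals, ∃ p ∈ cellsB grid, v = ptsC grid p) ∧
      (∀ p ∈ cellsB grid, ptsC grid p ∈ vals) := by
  have hbase : OuterInv grid (([] : PySem.Set (Int × Int)), ([] : List (List (Int × Int)))) := by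
    refine ⟨?_, ?_, ?_⟩
    · intro x
      constructor
      · intro h
        simp at h
      · rintro ⟨cl, h, -⟩
        simp at h
    · intro p hp
      simp at hp
    · intro cl hcl
      simp at hcl
  obtain ⟨⟨hio, hclos, hcls⟩, hcov, -⟩ := outer_fold grid (rowMajor grid) ([], [])
    (fun x hx => mem_rowMajor.1 hx) hbase
  refine ⟨((rowMajor grid).foldl (pvStepA grid) ([], [])).2.map calcPoints,
    caravansary_eq_fold grid, ?_, ?_⟩
  · intro v hv
    rw [List.mem_map] at hv
    obtain ⟨cl, hclm, rfl⟩ := hv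
    obtain ⟨s, hscell, hsin, hchar⟩ := hcls cl hclm
    refine ⟨s, hscell, ?_⟩
    rw [calcPoints_eq]
    unfold ptsC
    apply ptsList_congr
    intro y
    rw [hchar y, mem_compL]
  · intro p hpcell
    have hpv : p ∈ ((rowMajor grid).foldl (pvStepA grid) ([], [])).1 :=
      hcov p (mem_rowMajor.2 (mem_cellsB.1 hpcell).1) hpcell
    obtain ⟨cl, hclm, hpcl⟩ := (hio p).1 hpv
    obtain ⟨s, hscell, hsin, hchar⟩ := hcls cl hclm
    have hconn : Conng grid s p := ((hchar p).1 hpcl).2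
    rw [List.mem_map]
    refine ⟨cl, hclm, ?_⟩
    rw [calcPoints_eq, ← ptsC_congr hconn]
    unfold ptsC
    apply ptsList_congr
    intro y
    rw [hchar y, mem_compL]

-- ---------- B: the label-propagation algorithm ----------

def labv (L : PySem.Dict (Int × Int) (Int × Int)) (p : Int × Int) : Int × Int := L.getD p p

def GoodL (grid : List (List String)) (L : PySem.Dict (Int × Int) (Int × Int)) : Prop :=
  ∀ p ∈ cellsB grid, ∃ v, L.get? p = some v ∧ v ∈ cellsB grid ∧ Conng grid p v

lemma pairLt_iff {a b : Int × Int} :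
    pairLt a b = true ↔ (a.1 < b.1 ∨ (a.1 = b.1 ∧ a.2 < b.2)) := by
  unfold pairLt
  simp only [Bool.or_eq_true, Bool.and_eq_true, decide_eq_true_eq, beq_iff_eq]

lemma pairLt_trans {a b c : Int × Int} (h1 : pairLt a b = true) (h2 : pairLt b c = true) :
    pairLt a c = true := by
  rw [pairLt_iff] at h1 h2 ⊢; omega

lemma pairLt_irrefl (a : Int × Int) : pairLt a a = false := by
  rw [Bool.eq_false_iff]
  intro h
  rw [pairLt_iff] at h
  omega

lemma pairLt_total {a b : Int × Int} (h1 : pairLt a b = false) (h2 : pairLt b a = false) :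
    a = b := by
  have na : ¬(a.1 < b.1 ∨ (a.1 = b.1 ∧ a.2 < b.2)) := by
    rw [← pairLt_iff, h1]; simp
  have nb : ¬(b.1 < a.1 ∨ (b.1 = a.1 ∧ b.2 < a.2)) := by
    rw [← pairLt_iff, h2]; simp
  rw [Prod.ext_iff]
  omega

lemma pairLt_asymm {a b : Int × Int} (h : pairLt a b = true) : pairLt b a = false := by
  rw [Bool.eq_false_iff]
  intro h2
  rw [pairLt_iff] at h h2
  omega

lemma labv_mem_conn {grid : List (List String)} {L : PySem.Dict (Int × Int) (Int × Int)}
    (hG : GoodL grid L) {p : Int × Int} (hp : p ∈ cellsB grid) :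
    labv L p ∈ cellsB grid ∧ Conng grid p (labv L p) := by
  obtain ⟨v, h1, h2, h3⟩ := hG p hp
  unfold labv
  rw [PySem.Dict.getD_of_get?_eq_some _ _ h1]
  exact ⟨h2, h3⟩

lemma lab0_get (grid : List (List String)) (q : Int × Int) :
    ((cellsB grid).foldl (fun d p => d.insert p p) PySem.Dict.empty).get? q =
      if q ∈ cellsB grid then some q else none := by
  have key : ∀ (l : List (Int × Int)) (d : PySem.Dict (Int × Int) (Int × Int)),
      (l.foldl (fun d p => d.insert p p) d).get? q = if q ∈ l then some q else d.get? q := by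
    intro l
    induction l with
    | nil => intro d; simp
    | cons p t ih =>
      intro d
      rw [List.foldl_cons, ih]
      by_cases hq : q ∈ t
      · rw [if_pos hq, if_pos (List.mem_cons_of_mem _ hq)]
      · rw [if_neg hq]
        by_cases hqp : q = p
        · subst hqp
          rw [PySem.Dict.get?_insert_self, if_pos List.mem_cons_self]
        · rw [PySem.Dict.get?_insert_of_ne _ _ hqp, if_neg (by simp [hq, hqp])]
  rw [key]
  by_cases hq : q ∈ cellsB grid
  · rw [if_pos hq, if_pos hq]
  · rw [if_neg hq, if_neg hq, PySem.Dict.get?_empty]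

lemma GoodL_lab0 (grid : List (List String)) :
    GoodL grid ((cellsB grid).foldl (fun d p => d.insert p p) PySem.Dict.empty) := by
  intro p hp
  exact ⟨p, by rw [lab0_get, if_pos hp], hp, Relation.ReflTransGen.refl⟩

-- the inner minimum fold of one sweep step
lemma sweep_min (cellset : PySem.Set (Int × Int)) (D : PySem.Dict (Int × Int) (Int × Int))
    (l : List (Int × Int)) :
    ∀ m0 : Int × Int,
      ((l.foldl (fun m q =>
          if PySem.Set.contains cellset q ∧ pairLt (D.getD q q) m then D.getD q q else m) m0)
        = m0 ∨
        ∃ q ∈ l, PySem.Set.contains cellset q = true ∧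
          (l.foldl (fun m q =>
            if PySem.Set.contains cellset q ∧ pairLt (D.getD q q) m then D.getD q q else m) m0)
            = D.getD q q) ∧
      ((l.foldl (fun m q =>
          if PySem.Set.contains cellset q ∧ pairLt (D.getD q q) m then D.getD q q else m) m0)
        = m0 ∨
        pairLt (l.foldl (fun m q =>
          if PySem.Set.contains cellset q ∧ pairLt (D.getD q q) m then D.getD q q else m) m0)
          m0 = true) ∧
      (∀ q ∈ l, PySem.Set.contains cellset q = true →
        pairLt (D.getD q q)
          (l.foldl (fun m q =>
            if PySem.Set.contains cellset q ∧ pairLt (D.getD q q) m then D.getD q q else m) m0)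
          = false) := by
  intro m0
  induction l generalizing m0 with
  | nil =>
    refine ⟨Or.inl rfl, Or.inl rfl, ?_⟩
    intro q hq
    simp at hq
  | cons q0 t ih =>
    rw [List.foldl_cons]
    by_cases hc : PySem.Set.contains cellset q0 = true ∧ pairLt (D.getD q0 q0) m0 = true
    · rw [if_pos hc]
      obtain ⟨ih1, ih2, ih3⟩ := ih (D.getD q0 q0)
      refine ⟨?_, ?_, ?_⟩
      · rcases ih1 with h | ⟨q, hq, hcq, heq⟩
        · exact Or.inr ⟨q0, List.mem_cons_self, hc.1, h⟩
        · exact Or.inr ⟨q, List.mem_cons_of_mem _ hq, hcq, heq⟩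
      · right
        rcases ih2 with h | h
        · rw [h]; exact hc.2
        · exact pairLt_trans h hc.2
      · intro q hq hcq
        rcases List.mem_cons.1 hq with rfl | hqt
        · rcases ih2 with h | h
          · rw [h]; exact pairLt_irrefl _
          · exact pairLt_asymm h
        · exact ih3 q hqt hcq
    · rw [if_neg hc]
      obtain ⟨ih1, ih2, ih3⟩ := ih m0
      refine ⟨?_, ?_, ?_⟩
      · rcases ih1 with h | ⟨q, hq, hcq, heq⟩
        · exact Or.inl h
        · exact Or.inr ⟨q, List.mem_cons_of_mem _ hq, hcq, heq⟩
      · exact ih2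
      · intro q hq hcq
        rcases List.mem_cons.1 hq with rfl | hqt
        · have hnlt : pairLt (D.getD q q) m0 = false := by
            rw [Bool.eq_false_iff]
            intro h
            exact hc ⟨hcq, h⟩
          rcases ih2 with h | h
          · rw [h]; exact hnlt
          · rw [Bool.eq_false_iff]
            intro h2
            rw [Bool.eq_false_iff] at hnlt
            exact hnlt (pairLt_trans h2 h)
        · exact ih3 q hqt hcq

-- the combined invariant carried through one sweep
def SweepInv (grid : List (List String)) (L : PySem.Dict (Int × Int) (Int × Int))
    (st : PySem.Dict (Int × Int) (Int × Int) × Bool) : Prop :=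
  GoodL grid st.1 ∧
  (∀ p ∈ cellsB grid, labv st.1 p = labv L p ∨ pairLt (labv st.1 p) (labv L p) = true) ∧
  (st.2 = true → ∃ p ∈ cellsB grid, pairLt (labv st.1 p) (labv L p) = true) ∧
  (st.2 = false → st.1 = L)

lemma sweep_inv_aux (grid : List (List String)) (L : PySem.Dict (Int × Int) (Int × Int))
    (cellset : PySem.Set (Int × Int))
    (hcs : ∀ x, PySem.Set.contains cellset x = true ↔ x ∈ cellsB grid) :
    ∀ (l : List (Int × Int)), (∀ p ∈ l, p ∈ cellsB grid) →
    ∀ st, SweepInv grid L st →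
    SweepInv grid L (l.foldl (fun st p =>
      let m0 := st.1.getD p p
      let m := (pvNbrs p).foldl (fun m q =>
        if PySem.Set.contains cellset q ∧ pairLt (st.1.getD q q) m then st.1.getD q q else m) m0
      if pairLt m m0 then (st.1.insert p m, true) else st) st) := by
  intro l
  induction l with
  | nil => intro _ st h; exact h
  | cons p t ih =>
    intro hmem st hst
    rw [List.foldl_cons]
    apply ih (fun x hx => hmem x (List.mem_cons_of_mem _ hx))
    have hp : p ∈ cellsB grid := hmem p List.mem_cons_self
    dsimp only
    set M : Int × Int := (pvNbrs p).foldl (fun m q =>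
      if PySem.Set.contains cellset q ∧ pairLt (st.1.getD q q) m then st.1.getD q q else m)
      (st.1.getD p p) with hMdef
    by_cases hlt : pairLt M (st.1.getD p p) = true
    · rw [if_pos hlt]
      obtain ⟨hm1, hm2, hm3⟩ := sweep_min cellset st.1 (pvNbrs p) (st.1.getD p p)
      rw [← hMdef] at hm1 hm2 hm3
      obtain ⟨hG, hPW, hCW, hFF⟩ := hst
      rcases hm1 with hm0 | ⟨q, hqn, hqc, hmq⟩
      · rw [hm0, pairLt_irrefl] at hlt
        exact absurd hlt (by simp)
      · have hqcell : q ∈ cellsB grid := (hcs q).1 hqc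
        obtain ⟨vq, hvq, hvqc, hvqconn⟩ := hG q hqcell
        have hlabq : st.1.getD q q = vq := PySem.Dict.getD_of_get?_eq_some _ _ hvq
        have hstep : Stepg grid p q := ⟨hp, hqcell, (mem_pvNbrs).1 hqn⟩
        have hconn_pm : Conng grid p M := by
          rw [hmq, hlabq]
          exact Relation.ReflTransGen.trans (Relation.ReflTransGen.single hstep) hvqconn
        have hMcell : M ∈ cellsB grid := by
          rw [hmq, hlabq]; exact hvqc
        refine ⟨?_, ?_, ?_, ?_⟩
        · intro x hx
          by_cases hxp : x = p
          · subst hxp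
            exact ⟨M, PySem.Dict.get?_insert_self _ _ _, hMcell, hconn_pm⟩
          · obtain ⟨v, hv, hvc, hvconn⟩ := hG x hx
            exact ⟨v, by rw [PySem.Dict.get?_insert_of_ne _ _ hxp]; exact hv, hvc, hvconn⟩
        · intro x hx
          by_cases hxp : x = p
          · subst hxp
            right
            unfold labv
            rw [PySem.Dict.getD_insert_self]
            rcases hPW x hx with h | h
            · unfold labv at h; rw [← h]; exact hlt
            · unfold labv at h; exact pairLt_trans hlt h
          · unfold labv
            rw [PySem.Dict.getD_insert_of_ne _ _ _ hxp]
            exact hPW x hx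
        · intro _
          refine ⟨p, hp, ?_⟩
          unfold labv
          rw [PySem.Dict.getD_insert_self]
          rcases hPW p hp with h | h
          · unfold labv at h; rw [← h]; exact hlt
          · unfold labv at h; exact pairLt_trans hlt h
        · intro h
          exact absurd h (by simp)
    · rw [if_neg hlt]
      exact hst

lemma sweep_inv (grid : List (List String)) (L : PySem.Dict (Int × Int) (Int × Int))
    (hG : GoodL grid L) :
    SweepInv grid L (sweepB (cellsB grid) (PySem.Set.ofList (cellsB grid)) L) := by
  have base : SweepInv grid L (L, false) := by
    refine ⟨hG, fun p _ => Or.inl rfl, ?_, fun _ => rfl⟩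
    intro h
    exact absurd h (by simp)
  have hcs : ∀ x, PySem.Set.contains (PySem.Set.ofList (cellsB grid)) x = true ↔
      x ∈ cellsB grid := by
    intro x
    rw [PySem.Set.contains_iff, PySem.Set.mem_ofList]
  exact sweep_inv_aux grid L _ hcs (cellsB grid) (fun _ h => h) (L, false) base

lemma sweep_mono_true (cells : List (Int × Int)) (cellset : PySem.Set (Int × Int)) :
    ∀ (l : List (Int × Int)) (st : PySem.Dict (Int × Int) (Int × Int) × Bool),
      st.2 = true →
      (l.foldl (fun st p =>
        let m0 := st.1.getD p p
        let m := (pvNbrs p).foldl (fun m q =>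
          if PySem.Set.contains cellset q ∧ pairLt (st.1.getD q q) m then st.1.getD q q else m) m0
        if pairLt m m0 then (st.1.insert p m, true) else st) st).2 = true := by
  intro l
  induction l with
  | nil => intro st h; exact h
  | cons p t ih =>
    intro st h
    rw [List.foldl_cons]
    apply ih
    dsimp only
    split
    · rfl
    · exact h

-- if a sweep reports no change, it changed nothing and every cell is a local minimum
lemma sweep_false_fix (grid : List (List String)) (L : PySem.Dict (Int × Int) (Int × Int))
    (hfix : (sweepB (cellsB grid) (PySem.Set.ofList (cellsB grid)) L).2 = false) :
    (sweepB (cellsB grid) (PySem.Set.ofList (cellsB grid)) L).1 = L ∧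
    (∀ p ∈ cellsB grid, ∀ q ∈ pvNbrs p, q ∈ cellsB grid →
      pairLt (labv L q) (labv L p) = false) := by
  have aux : ∀ (l : List (Int × Int)) (st : PySem.Dict (Int × Int) (Int × Int) × Bool),
      (l.foldl (fun st p =>
        let m0 := st.1.getD p p
        let m := (pvNbrs p).foldl (fun m q =>
          if PySem.Set.contains (PySem.Set.ofList (cellsB grid)) q ∧ pairLt (st.1.getD q q) m
          then st.1.getD q q else m) m0
        if pairLt m m0 then (st.1.insert p m, true) else st) st).2 = false →
      (l.foldl (fun st p =>
        let m0 := st.1.getD p p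
        let m := (pvNbrs p).foldl (fun m q =>
          if PySem.Set.contains (PySem.Set.ofList (cellsB grid)) q ∧ pairLt (st.1.getD q q) m
          then st.1.getD q q else m) m0
        if pairLt m m0 then (st.1.insert p m, true) else st) st) = st ∧
      (∀ p ∈ l, pairLt ((pvNbrs p).foldl (fun m q =>
          if PySem.Set.contains (PySem.Set.ofList (cellsB grid)) q ∧ pairLt (st.1.getD q q) m
          then st.1.getD q q else m) (st.1.getD p p)) (st.1.getD p p) = false) := by
    intro l
    induction l with
    | nil =>
      intro st _
      refine ⟨rfl, ?_⟩
      intro p hp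
      simp at hp
    | cons p t ih =>
      intro st hfalse
      rw [List.foldl_cons] at hfalse ⊢
      dsimp only at hfalse ⊢
      by_cases hlt : pairLt ((pvNbrs p).foldl (fun m q =>
          if PySem.Set.contains (PySem.Set.ofList (cellsB grid)) q ∧ pairLt (st.1.getD q q) m
          then st.1.getD q q else m) (st.1.getD p p)) (st.1.getD p p) = true
      · exfalso
        rw [if_pos hlt] at hfalse
        have hmono := sweep_mono_true (cellsB grid) (PySem.Set.ofList (cellsB grid)) t
          (st.1.insert p ((pvNbrs p).foldl (fun m q =>
            if PySem.Set.contains (PySem.Set.ofList (cellsB grid)) q ∧ pairLt (st.1.getD q q) m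
            then st.1.getD q q else m) (st.1.getD p p)), true) rfl
        rw [hmono] at hfalse
        simp at hfalse
      · rw [if_neg hlt] at hfalse ⊢
        obtain ⟨heq, hall⟩ := ih st hfalse
        refine ⟨heq, ?_⟩
        intro p' hp'
        rcases List.mem_cons.1 hp' with rfl | hpt
        · rw [Bool.not_eq_true] at hlt
          exact hlt
        · exact hall p' hpt
  have hfix2 := hfix
  unfold sweepB at hfix2
  obtain ⟨heq, hall⟩ := aux (cellsB grid) (L, false) hfix2
  constructor
  · unfold sweepB
    rw [heq]
  · intro p hp q hqn hqc
    have hstep := hall p hp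
    obtain ⟨hm1, hm2, hm3⟩ := sweep_min (PySem.Set.ofList (cellsB grid)) L (pvNbrs p) (L.getD p p)
    have hqcont : PySem.Set.contains (PySem.Set.ofList (cellsB grid)) q = true := by
      rw [PySem.Set.contains_iff, PySem.Set.mem_ofList]
      exact hqc
    have hq3 := hm3 q hqn hqcont
    unfold labv
    rcases hm2 with hM | hM
    · rw [hM] at hq3
      exact hq3
    · rw [hstep] at hM
      exact absurd hM (by simp)

def FixL (grid : List (List String)) (L : PySem.Dict (Int × Int) (Int × Int)) : Prop :=
  ∀ p ∈ cellsB grid, ∀ q ∈ pvNbrs p, q ∈ cellsB grid → pairLt (labv L q) (labv L p) = false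

def rankP (grid : List (List String)) (x : Int × Int) : Nat :=
  x.1.toNat * pvW grid + x.2.toNat

def PhiL (grid : List (List String)) (L : PySem.Dict (Int × Int) (Int × Int)) : Nat :=
  ((cellsB grid).map (fun p => rankP grid (labv L p))).sum

lemma rankP_lt {grid : List (List String)} {a b : Int × Int}
    (ha : a ∈ cellsB grid) (hb : b ∈ cellsB grid) (h : pairLt a b = true) :
    rankP grid a < rankP grid b := by
  rw [pairLt_iff] at h
  rw [mem_cellsB] at ha hb
  obtain ⟨⟨ha1, ha2, ha3, ha4⟩, -⟩ := ha
  obtain ⟨⟨hb1, hb2, hb3, hb4⟩, -⟩ := hb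
  unfold rankP
  rcases h with h | ⟨h1, h2⟩
  · have step1 : a.1.toNat * pvW grid + a.2.toNat < (a.1.toNat + 1) * pvW grid := by
      have : a.2.toNat < pvW grid := by omega
      nlinarith [Nat.le_refl (a.1.toNat * pvW grid)]
    have step2 : (a.1.toNat + 1) * pvW grid ≤ b.1.toNat * pvW grid :=
      Nat.mul_le_mul_right _ (by omega)
    omega
  · have : a.1.toNat * pvW grid = b.1.toNat * pvW grid := by rw [show a.1.toNat = b.1.toNat by omega]
    omega

lemma rankP_bound {grid : List (List String)} {a : Int × Int} (ha : a ∈ cellsB grid) :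
    rankP grid a < grid.length * pvW grid := by
  rw [mem_cellsB] at ha
  obtain ⟨⟨h1, h2, h3, h4⟩, -⟩ := ha
  unfold rankP
  have step1 : a.1.toNat * pvW grid + a.2.toNat < (a.1.toNat + 1) * pvW grid := by
    have : a.2.toNat < pvW grid := by omega
    nlinarith [Nat.le_refl (a.1.toNat * pvW grid)]
  have step2 : (a.1.toNat + 1) * pvW grid ≤ grid.length * pvW grid :=
    Nat.mul_le_mul_right _ (by omega)
  omega

lemma loopB_fix (grid : List (List String)) :
    ∀ (fuel : Nat) (L : PySem.Dict (Int × Int) (Int × Int)),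
      GoodL grid L → PhiL grid L < fuel →
      GoodL grid (loopB (cellsB grid) (PySem.Set.ofList (cellsB grid)) fuel L) ∧
      FixL grid (loopB (cellsB grid) (PySem.Set.ofList (cellsB grid)) fuel L) := by
  intro fuel
  induction fuel with
  | zero =>
    intro L hG hPhi
    exact absurd hPhi (Nat.not_lt_zero _)
  | succ fuel ih =>
    intro L hG hPhi
    have hsi := sweep_inv grid L hG
    simp only [loopB]
    by_cases hch : (sweepB (cellsB grid) (PySem.Set.ofList (cellsB grid)) L).2 = true
    · rw [if_pos hch]
      obtain ⟨hG1, hPW, hCW, _⟩ := hsi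
      obtain ⟨w, hw, hwlt⟩ := hCW hch
      have hdec : PhiL grid (sweepB (cellsB grid) (PySem.Set.ofList (cellsB grid)) L).1 <
          PhiL grid L := by
        unfold PhiL
        apply List.sum_lt_sum
        · intro p hp
          rcases hPW p hp with h | h
          · rw [h]
          · exact le_of_lt (rankP_lt (labv_mem_conn hG1 hp).1 (labv_mem_conn hG hp).1 h)
        · exact ⟨w, hw, rankP_lt (labv_mem_conn hG1 hw).1 (labv_mem_conn hG hw).1 hwlt⟩
      exact ih _ hG1 (by omega)
    · rw [if_neg hch]
      rw [Bool.not_eq_true] at hch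
      obtain ⟨h1, h2⟩ := sweep_false_fix grid L hch
      rw [h1]
      exact ⟨hG, h2⟩

-- at a fixpoint, labels are constant on components and name a member of the component
lemma fix_lab_conn (grid : List (List String)) (L : PySem.Dict (Int × Int) (Int × Int))
    (hG : GoodL grid L) (hF : FixL grid L) :
    ∀ p ∈ cellsB grid, ∀ q ∈ cellsB grid, (labv L p = labv L q ↔ Conng grid p q) := by
  have key : ∀ {a b : Int × Int}, Conng grid a b → labv L a = labv L b := by
    intro a b hconn
    induction hconn with
    | refl => rfl
    | tail _ hbc ihl =>
      rw [ihl]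
      have h1 : pairLt (labv L _) (labv L _) = false :=
        hF _ hbc.1 _ ((mem_pvNbrs).2 hbc.2.2) hbc.2.1
      have h2 : pairLt (labv L _) (labv L _) = false :=
        hF _ hbc.2.1 _ ((mem_pvNbrs).2 (Adjp_symm hbc.2.2)) hbc.1
      exact pairLt_total h2 h1
  intro p hp q hq
  constructor
  · intro heq
    obtain ⟨hv1, hc1⟩ := labv_mem_conn hG hp
    obtain ⟨hv2, hc2⟩ := labv_mem_conn hG hq
    rw [heq] at hc1
    exact Relation.ReflTransGen.trans hc1 (Conng_symm hc2)
  · intro hconn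
    exact key hconn

-- the grouping loop, per key
lemma group_getD (lab : PySem.Dict (Int × Int) (Int × Int)) :
    ∀ (l : List (Int × Int)) (g : PySem.Dict (Int × Int) (PySem.Set Int × PySem.Set Int))
      (k : Int × Int),
      ((l.foldl (fun g p =>
          g.modify (lab.getD p p) (([], []) : PySem.Set Int × PySem.Set Int)
            (fun cur => (PySem.Set.add cur.1 p.1, PySem.Set.add cur.2 p.2))) g).getD k ([], []))
        = (l.filter (fun p => lab.getD p p == k)).foldl
            (fun cur p => (PySem.Set.add cur.1 p.1, PySem.Set.add cur.2 p.2))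
            (g.getD k ([], [])) := by
  intro l
  induction l with
  | nil => intro g k; simp
  | cons p t ih =>
    intro g k
    rw [List.foldl_cons, List.filter_cons, ih]
    by_cases hk : lab.getD p p = k
    · rw [if_pos (by rw [beq_iff_eq]; exact hk), List.foldl_cons]
      subst hk
      rw [PySem.Dict.getD_modify_self]
    · rw [if_neg (by rw [beq_iff_eq]; exact hk),
        PySem.Dict.getD_modify_of_ne _ _ _ (fun h => hk h.symm)]

lemma valsB_spec (grid : List (List String)) :
    ∃ vals : List Int,
      caravansary_alt grid = vals.foldl max 0 ∧
      (∀ v ∈ vals, ∃ p ∈ cellsB grid, v = ptsC grid p) ∧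
      (∀ p ∈ cellsB grid, ptsC grid p ∈ vals) := by
  set LS := loopB (cellsB grid) (PySem.Set.ofList (cellsB grid))
      ((cellsB grid).length * (grid.length * (PySem.List.pyGetD grid 0 []).length) + 1)
      ((cellsB grid).foldl (fun d p => d.insert p p) PySem.Dict.empty) with hLS
  set G := (cellsB grid).foldl (fun g p =>
      g.modify (LS.getD p p) (([], []) : PySem.Set Int × PySem.Set Int)
        (fun cur => (PySem.Set.add cur.1 p.1, PySem.Set.add cur.2 p.2))) PySem.Dict.empty with hG
  have halt : caravansary_alt grid = (PySem.Dict.values G).foldl (fun best g =>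
      if PySem.List.len g.1 + PySem.List.len g.2 > best
      then PySem.List.len g.1 + PySem.List.len g.2 else best) 0 := by
    rw [hG, hLS]
    rfl
  have hG0 : GoodL grid ((cellsB grid).foldl (fun d p => d.insert p p) PySem.Dict.empty) :=
    GoodL_lab0 grid
  have hPhi : PhiL grid ((cellsB grid).foldl (fun d p => d.insert p p) PySem.Dict.empty) <
      (cellsB grid).length * (grid.length * (PySem.List.pyGetD grid 0 []).length) + 1 := by
    have hbound : ∀ x ∈ (cellsB grid).map (fun p => rankP grid
        (labv ((cellsB grid).foldl (fun d p => d.insert p p) PySem.Dict.empty) p)),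
        x ≤ grid.length * pvW grid := by
      intro x hx
      rw [List.mem_map] at hx
      obtain ⟨p, hp, rfl⟩ := hx
      have hl : labv ((cellsB grid).foldl (fun d p => d.insert p p) PySem.Dict.empty) p = p := by
        unfold labv
        exact PySem.Dict.getD_of_get?_eq_some _ _ (by rw [lab0_get, if_pos hp])
      rw [hl]
      exact le_of_lt (rankP_bound hp)
    have hsum := List.sum_le_card_nsmul _ _ hbound
    rw [List.length_map, smul_eq_mul] at hsum
    unfold PhiL
    unfold pvW at hsum
    exact Nat.lt_succ_of_le hsum
  obtain ⟨hGS, hFS⟩ := loopB_fix grid _ _ hG0 hPhi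
  rw [← hLS] at hGS hFS
  have hkeys : G.keys = PySem.Set.ofList ((cellsB grid).map (fun p => LS.getD p p)) := by
    rw [hG]
    rw [PySem.Dict.keys_foldl_modify_key (cellsB grid) (fun p => LS.getD p p)
      (([], []) : PySem.Set Int × PySem.Set Int)
      (fun _ p cur => (PySem.Set.add cur.1 p.1, PySem.Set.add cur.2 p.2)) PySem.Dict.empty]
    rw [PySem.Dict.keys_empty, PySem.Set.update_nil_left]
  have hnd : G.keys.Nodup := by
    rw [hG]
    exact PySem.Dict.nodup_keys_foldl_modify_key _ _ _ _ _ PySem.Dict.nodup_keys_empty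
  have hvals : PySem.Dict.values G = G.keys.map (fun k => G.getD k ([], [])) := by
    have hitems := PySem.Dict.items_eq_map_keys G hnd (([], []) : PySem.Set Int × PySem.Set Int)
    show G.items.map Prod.snd = _
    rw [hitems, List.map_map]
    rfl
  have hgroup : ∀ k, G.getD k ([], []) =
      (PySem.Set.ofList (((cellsB grid).filter (fun p => LS.getD p p == k)).map Prod.fst),
       PySem.Set.ofList (((cellsB grid).filter (fun p => LS.getD p p == k)).map Prod.snd)) := by
    intro k
    rw [hG, group_getD LS (cellsB grid) PySem.Dict.empty k, PySem.Dict.getD_empty, pairSetFold]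
  have hval : ∀ p ∈ cellsB grid,
      PySem.List.len (G.getD (LS.getD p p) ([], [])).1 +
        PySem.List.len (G.getD (LS.getD p p) ([], [])).2 = ptsC grid p := by
    intro p hp
    have h1 : ∀ (l : List (Int × Int)),
        PySem.List.len (PySem.Set.ofList (l.map Prod.fst)) +
          PySem.List.len (PySem.Set.ofList (l.map Prod.snd)) = ptsList l := by
      intro l
      simp only [PySem.List.len_eq]
      unfold ptsList
      rw [len_ofList_eq_dedup, len_ofList_eq_dedup]
    rw [hgroup, h1]
    unfold ptsC
    apply ptsList_congr
    intro y
    rw [List.mem_filter, mem_compL, beq_iff_eq]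
    constructor
    · rintro ⟨hy, heq⟩
      exact ⟨hy, (fix_lab_conn grid LS hGS hFS p hp y hy).1 heq.symm⟩
    · rintro ⟨hy, hconn⟩
      exact ⟨hy, ((fix_lab_conn grid LS hGS hFS p hp y hy).2 hconn).symm⟩
  refine ⟨G.keys.map (fun k => PySem.List.len (G.getD k ([], [])).1 +
      PySem.List.len (G.getD k ([], [])).2), ?_, ?_, ?_⟩
  · rw [halt, hvals, List.foldl_map]
    exact foldl_best_map (fun k => PySem.List.len (G.getD k ([], [])).1 +
      PySem.List.len (G.getD k ([], [])).2) G.keys 0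
  · intro v hv
    rw [List.mem_map] at hv
    obtain ⟨k, hk, rfl⟩ := hv
    rw [hkeys, PySem.Set.mem_ofList, List.mem_map] at hk
    obtain ⟨p, hp, rfl⟩ := hk
    exact ⟨p, hp, hval p hp⟩
  · intro p hp
    rw [List.mem_map]
    refine ⟨LS.getD p p, ?_, hval p hp⟩
    rw [hkeys, PySem.Set.mem_ofList, List.mem_map]
    exact ⟨p, hp, rfl⟩

-- ===== VERDICT (by name: the statement is the Claim_ definition above) =====
theorem caravansary_spec : Claim_equal_caravansary := by
  intro grid _ _
  unfold Spec_caravansary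
  obtain ⟨va, hva, hva1, hva2⟩ := valsA_spec grid
  obtain ⟨vb, hvb, hvb1, hvb2⟩ := valsB_spec grid
  rw [hva, hvb]
  apply best_unique
  · intro v hv
    obtain ⟨p, hp, rfl⟩ := hva1 v hv
    exact hvb2 p hp
  · intro v hv
    obtain ⟨p, hp, rfl⟩ := hvb1 v hv
    exact hva2 p hp
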